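-- pv_equiv track=rewrite | github.com/hackthehackerman/adventofcode | 2023/day12.py | countwithstop
-- ===== SOURCE A (Python) =====
-- def countwithstop(s,c,stops):
--     ret = []
--     cur = 0
--     for i in range(len(s)):
--         if s[i] == c:
--             cur += 1
--         elif cur > 0:
--             ret.append(cur)
--             cur = 0
--         if s[i] in stops:
--             break
--     if cur > 0:
--         ret.append(cur)
--     return ret
-- ===== SOURCE B (Python) =====
-- def countwithstop(s, c, stops):
--     # Phase 1: boundary — keep s up to and including the first stop char.
--     end = len(s)
--     for i, ch in enumerate(s):
--         if ch in stops:
--             end = i + 1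
--             break
--     prefix = s[:end]
--     # Phase 2: run-length encode the prefix; keep lengths of groups equal to c.
--     ret = []
--     i = 0
--     n = len(prefix)
--     while i < n:
--         j = i
--         while j < n and prefix[j] == prefix[i]:
--             j += 1
--         if prefix[i] == c:
--             ret.append(j - i)
--         i = j
--     return ret
-- ===== Notes on version B (the rewrite author's own statement) =====
-- stated objective: alternative
-- what changed: Replaces A's single pass with a manual cur-counter state machine by two phases: first compute the boundary (prefix up to and including the first stop char), then run-length encode that prefix and collect the lengths of the groups equal to c.
import Mathlib
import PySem

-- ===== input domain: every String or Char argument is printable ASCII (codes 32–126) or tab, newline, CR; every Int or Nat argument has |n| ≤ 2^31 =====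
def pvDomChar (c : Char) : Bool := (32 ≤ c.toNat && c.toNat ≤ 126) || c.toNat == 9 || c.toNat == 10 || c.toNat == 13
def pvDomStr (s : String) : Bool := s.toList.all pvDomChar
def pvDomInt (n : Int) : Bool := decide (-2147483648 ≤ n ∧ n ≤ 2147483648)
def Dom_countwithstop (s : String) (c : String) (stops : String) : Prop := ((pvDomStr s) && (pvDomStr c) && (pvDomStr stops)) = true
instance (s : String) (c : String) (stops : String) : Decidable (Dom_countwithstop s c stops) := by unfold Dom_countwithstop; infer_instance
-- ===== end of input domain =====

-- B replaces A's manual cur-state machine by a boundary computation (prefix up to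
-- and including the first stop char) followed by a run-length-encoding pass; same results, alternative decomposition.


-- ===== PORT A =====
-- loop of A: walks the chars one by one, keeping the current run length `cur`
-- and the output list `ret`; `s[i] == c` is singleton-string equality (c.toList = [x]),
-- `s[i] in stops` is membership of the char in stops; `break` flushes and returns.
def countwithstopGoA (c : List Char) (stops : List Char) : List Char → Int → List Int → List Int
  | [], cur, ret => if cur > 0 then ret ++ [cur] else ret
  | x :: xs, cur, ret =>
    if c = [x] then
      if x ∈ stops then (if cur + 1 > 0 then ret ++ [cur + 1] else ret)
      else countwithstopGoA c stops xs (cur + 1) ret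
    else if cur > 0 then
      -- cur is appended and reset to 0; on break nothing more is flushed
      if x ∈ stops then ret ++ [cur]
      else countwithstopGoA c stops xs 0 (ret ++ [cur])
    else
      if x ∈ stops then ret
      else countwithstopGoA c stops xs cur ret

def countwithstop (s : String) (c : String) (stops : String) : List Int :=
  countwithstopGoA c.toList stops.toList s.toList 0 []

-- ===== PORT B =====
-- Phase 1 of Source B: the prefix of s up to and including the first stop char.
def countwithstopPrefix (stops : List Char) : List Char → List Char
  | [] => []
  | x :: xs => if x ∈ stops then [x] else x :: countwithstopPrefix stops xs

-- Phase 2 of Source B: run-length encode (the inner j-loop = takeWhile/dropWhile over the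
-- current group) and keep the lengths of the groups whose character equals c.
def countwithstopRLE (c : List Char) : List Char → List Int
  | [] => []
  | x :: xs =>
    if c = [x] then
      ((1 : Int) + (xs.takeWhile (· = x)).length) :: countwithstopRLE c (xs.dropWhile (· = x))
    else countwithstopRLE c (xs.dropWhile (· = x))
termination_by l => l.length
decreasing_by
  all_goals
    simp only [List.length_cons]
    exact Nat.lt_succ_of_le (List.length_dropWhile_le _ _)

def countwithstop_alt (s : String) (c : String) (stops : String) : List Int :=
  countwithstopRLE c.toList (countwithstopPrefix stops.toList s.toList)

-- ===== PRECONDITION & SPEC =====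
def Spec_countwithstop (s : String) (c : String) (stops : String) (out : List Int) : Prop := out = countwithstop_alt s c stops
instance (s : String) (c : String) (stops : String) (out : List Int) : Decidable (Spec_countwithstop s c stops out) := by unfold Spec_countwithstop; infer_instance

-- ===== CLAIM (what is proved, stated in full; the proofs are below) =====
def Claim_equal_countwithstop : Prop := ∀ (s : String) (c : String) (stops : String), Dom_countwithstop s c stops → Spec_countwithstop s c stops (countwithstop s c stops)

-- ===== LEMMAS AND PROOFS =====

-- proof helper: A's loop with the break (and stops) erased
def countwithstopGoNB (c : List Char) : List Char → Int → List Int → List Int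
  | [], cur, ret => if cur > 0 then ret ++ [cur] else ret
  | x :: xs, cur, ret =>
    if c = [x] then countwithstopGoNB c xs (cur + 1) ret
    else if cur > 0 then countwithstopGoNB c xs 0 (ret ++ [cur])
    else countwithstopGoNB c xs cur ret

-- A's loop over l is the break-free loop over the prefix up to the first stop char
theorem goA_eq_goNB_prefix (c stops : List Char) :
    ∀ (l : List Char) (cur : Int) (ret : List Int),
      countwithstopGoA c stops l cur ret =
        countwithstopGoNB c (countwithstopPrefix stops l) cur ret := by
  intro l
  induction l with
  | nil => intro cur ret; simp [countwithstopGoA, countwithstopPrefix, countwithstopGoNB]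
  | cons x xs ih =>
    intro cur ret
    by_cases hc : c = [x]
    · subst hc
      by_cases hx : x ∈ stops <;> by_cases hcur : cur > 0 <;>
        simp [countwithstopGoA, countwithstopPrefix, countwithstopGoNB, hx, hcur, ih]
    · by_cases hx : x ∈ stops <;> by_cases hcur : cur > 0 <;>
        simp [countwithstopGoA, countwithstopPrefix, countwithstopGoNB, hx, hc, hcur, ih]

-- skipping a group of non-c chars one at a time or all at once is the same
theorem rle_skip (c : List Char) (x : Char) (hc : ¬ c = [x]) :
    ∀ (xs : List Char), countwithstopRLE c (x :: xs) = countwithstopRLE c xs := by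
  intro xs
  induction xs with
  | nil => simp [countwithstopRLE, hc]
  | cons y ys ih =>
    by_cases hy : y = x
    · subst hy
      rw [countwithstopRLE, countwithstopRLE]
      simp only [hc, if_false, List.dropWhile]
      simp
    · rw [countwithstopRLE]
      simp only [hc, if_false]
      simp [List.dropWhile, hy]

-- when c is the singleton [x], the two group predicates agree
theorem pred_eq (x : Char) :
    (fun y => decide ([x] = [y])) = (fun y : Char => decide (y = x)) := by
  funext y
  by_cases h : y = x
  · subst h; simp
  · have h2 : ¬ x = y := fun e => h e.symm
    simp [h, h2]

theorem takeWhile_pred_eq (x : Char) (xs : List Char) :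
    xs.takeWhile (fun y => decide ([x] = [y])) = xs.takeWhile (fun y => decide (y = x)) := by
  rw [pred_eq]

theorem dropWhile_pred_eq (x : Char) (xs : List Char) :
    xs.dropWhile (fun y => decide ([x] = [y])) = xs.dropWhile (fun y => decide (y = x)) := by
  rw [pred_eq]

-- the main invariant: the break-free loop computes the RLE result, with a pending
-- positive run n+1 merged into the leading c-group
theorem goNB_spec (c : List Char) :
    ∀ (m : List Char),
      (∀ ret : List Int, countwithstopGoNB c m 0 ret = ret ++ countwithstopRLE c m) ∧
      (∀ (n : ℕ) (ret : List Int),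
        countwithstopGoNB c m ((n : Int) + 1) ret =
          ret ++ (((n : Int) + 1 + (m.takeWhile (fun y => c = [y])).length) ::
                  countwithstopRLE c (m.dropWhile (fun y => c = [y])))) := by
  intro m
  induction m with
  | nil =>
    constructor
    · intro ret; simp [countwithstopGoNB, countwithstopRLE]
    · intro n ret
      have hpos : ((n : Int) + 1) > 0 := by positivity
      simp [countwithstopGoNB, countwithstopRLE, hpos]
  | cons x xs ih =>
    constructor
    · intro ret
      by_cases hc : c = [x]
      · subst hc
        rw [countwithstopGoNB, countwithstopRLE]
        simp only [zero_add]
        have h0 := ih.2 0 ret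
        simp only [Nat.cast_zero, zero_add] at h0
        rw [h0, takeWhile_pred_eq, dropWhile_pred_eq]
        congr 2
      · rw [countwithstopGoNB]
        simp only [hc, if_false, gt_iff_lt, lt_self_iff_false]
        rw [ih.1 ret, rle_skip c x hc xs]
    · intro n ret
      by_cases hc : c = [x]
      · subst hc
        rw [countwithstopGoNB]
        have h1 := ih.2 (n + 1) ret
        push_cast at h1
        rw [h1, takeWhile_pred_eq, dropWhile_pred_eq]
        simp [List.takeWhile, List.dropWhile, eq_comm]
        ring
      · rw [countwithstopGoNB]
        have hpos : ((n : Int) + 1) > 0 := by positivity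
        simp only [hc, if_false, if_pos hpos]
        rw [ih.1 (ret ++ [(n : Int) + 1])]
        have ht : (x :: xs).takeWhile (fun y => decide (c = [y])) = [] := by
          simp [List.takeWhile, hc]
        have hd : (x :: xs).dropWhile (fun y => decide (c = [y])) = x :: xs := by
          simp [List.dropWhile, hc]
        rw [ht, hd, rle_skip c x hc xs]
        simp

-- ===== VERDICT (by name: the statement is the Claim_ definition above) =====
theorem countwithstop_spec : Claim_equal_countwithstop := by
  intro s c stops _
  unfold Spec_countwithstop countwithstop countwithstop_alt
  rw [goA_eq_goNB_prefix]
  simpa using (goNB_spec c.toList (countwithstopPrefix stops.toList s.toList)).1 []
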